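-- pv_equiv track=rewrite | github.com/turkeyncheese/pythonscripts | lifepathnumber.py | life_path_number
-- ===== SOURCE A (Python) =====
-- def life_path_number(birthdate):
--     birthdate = birthdate.replace('-', '')
--     res = 0
--     for num in birthdate:
--         res += int(num)
--
--         if res > 9:
--             res = res % 10 + res // 10
--     return res
-- ===== SOURCE B (Python) =====
-- def life_path_number(birthdate):
--     birthdate = birthdate.replace('-', '')
--     total = sum(int(c) for c in birthdate)
--     return 0 if total == 0 else 1 + (total - 1) % 9
-- ===== Notes on version B (the rewrite author's own statement) =====
-- stated objective: simpler
-- what changed: B separates accumulation from reduction: it sums all digits in one pass and then applies the digital-root closed form 1 + (S-1) % 9 instead of A's per-step conditional re-reduction inside the loop.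
import Mathlib
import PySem

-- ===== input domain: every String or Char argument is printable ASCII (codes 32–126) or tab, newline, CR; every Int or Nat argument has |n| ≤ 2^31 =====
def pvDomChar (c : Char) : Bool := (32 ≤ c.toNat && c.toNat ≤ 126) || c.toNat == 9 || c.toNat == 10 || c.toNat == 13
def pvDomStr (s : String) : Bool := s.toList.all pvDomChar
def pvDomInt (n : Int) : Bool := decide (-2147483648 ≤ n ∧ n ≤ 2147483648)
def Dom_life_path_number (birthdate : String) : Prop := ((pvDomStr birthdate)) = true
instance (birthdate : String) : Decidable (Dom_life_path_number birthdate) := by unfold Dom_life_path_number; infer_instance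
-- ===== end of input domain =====

-- B separates the digit accumulation from the reduction: one summing pass, then the
-- digital-root closed form 1 + (S-1) % 9, instead of A's per-step conditional reduction. Same cost.


-- ===== PORT A =====
-- int(num) for a one-character string num is PySem.Int.ofStr? on that string; Pre_ below
-- restricts to inputs where it succeeds (Python raises ValueError otherwise).
def life_path_number (birthdate : String) : Int :=
  let bd := PySem.Str.replace birthdate "-" ""
  bd.toList.foldl
    (fun res num =>
      let res := res + (PySem.Int.ofStr? (String.ofList [num])).getD 0
      if res > 9 then PySem.Int.mod res 10 + PySem.Int.floordiv res 10 else res)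
    0

-- ===== PORT B =====
def life_path_number_alt (birthdate : String) : Int :=
  let bd := PySem.Str.replace birthdate "-" ""
  let total := bd.toList.foldl (fun acc c => acc + (PySem.Int.ofStr? (String.ofList [c])).getD 0) 0
  if total = 0 then 0 else 1 + PySem.Int.mod (total - 1) 9

-- ===== PRECONDITION & SPEC =====
-- Pre_ excludes exactly the inputs containing a character other than a decimal digit or a hyphen,
-- on which Python's int(num) (in A, and B's sum alike) raises ValueError.
def Pre_life_path_number (birthdate : String) : Prop :=
  (birthdate.toList.all (fun c => c == '-' || c.isDigit)) = true
instance (birthdate : String) : Decidable (Pre_life_path_number birthdate) := by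
  unfold Pre_life_path_number; infer_instance

def pvWitness_life_path_number : String := "1990-12-31"

def Spec_life_path_number (birthdate : String) (out : Int) : Prop := out = life_path_number_alt birthdate
instance (birthdate : String) (out : Int) : Decidable (Spec_life_path_number birthdate out) := by unfold Spec_life_path_number; infer_instance

-- ===== CLAIM (what is proved, stated in full; the proofs are below) =====
def Claim_equal_life_path_number : Prop := ∀ (birthdate : String), Dom_life_path_number birthdate → Pre_life_path_number birthdate → Spec_life_path_number birthdate (life_path_number birthdate)

-- ===== LEMMAS AND PROOFS =====

-- the value A's (and B's) port adds for one character
def pvDv (c : Char) : Int := (PySem.Int.ofStr? (String.ofList [c])).getD 0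

-- digital root in closed form (B's reduction)
def pvDr (S : Int) : Int := if S = 0 then 0 else 1 + PySem.Int.mod (S - 1) 9

lemma pvDv_bounds : ∀ n : Nat, n < 128 →
    0 ≤ pvDv (Char.ofNat n) ∧ pvDv (Char.ofNat n) ≤ 9 := by decide

lemma pvDv_bounds' (c : Char) (h : c.toNat < 128) : 0 ≤ pvDv c ∧ pvDv c ≤ 9 := by
  have := pvDv_bounds c.toNat h
  rwa [Char.ofNat_toNat] at this

lemma pv_go_filter : ∀ (fuel : Nat) (l acc : List Char), l.length ≤ fuel →
    PySem.Chars.replace.go ['-'] [] fuel l acc = acc.reverse ++ l.filter (· ≠ '-') := by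
  intro fuel
  induction fuel with
  | zero => intro l acc h; cases l with
    | nil => simp [PySem.Chars.replace.go]
    | cons c t => simp at h
  | succ n ih =>
    intro l acc h
    cases l with
    | nil => simp [PySem.Chars.replace.go]
    | cons c t =>
      have ht : t.length ≤ n := by simpa using h
      rw [PySem.Chars.replace.go]
      by_cases hc : c = '-'
      · subst hc; simp [List.isPrefixOf, ih t acc ht]
      · simp [List.isPrefixOf, Ne.symm hc, ih t (c :: acc) ht, hc]

lemma pv_replace_toList (s : String) :
    (PySem.Str.replace s "-" "").toList = s.toList.filter (· ≠ '-') := by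
  rw [PySem.Str.toList_replace]
  show PySem.Chars.replace s.toList ['-'] [] = _
  rw [PySem.Chars.replace]
  simp only [List.isEmpty]
  exact pv_go_filter _ _ _ le_rfl

lemma pv_step_dr (S d : Int) (hS : 0 ≤ S) (hd0 : 0 ≤ d) (hd9 : d ≤ 9) :
    (if pvDr S + d > 9
      then PySem.Int.mod (pvDr S + d) 10 + PySem.Int.floordiv (pvDr S + d) 10
      else pvDr S + d) = pvDr (S + d) := by
  unfold pvDr
  simp only [PySem.Int.mod_eq_emod_of_pos (show (0:Int) < 10 by norm_num),
    PySem.Int.mod_eq_emod_of_pos (show (0:Int) < 9 by norm_num),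
    PySem.Int.floordiv_eq_ediv_of_pos (show (0:Int) < 10 by norm_num)]
  split_ifs <;> omega

lemma pv_foldA (l : List Char) (hl : ∀ c ∈ l, c.toNat < 128) :
    ∀ S : Int, 0 ≤ S →
    l.foldl (fun res num =>
        let res := res + (PySem.Int.ofStr? (String.ofList [num])).getD 0
        if res > 9 then PySem.Int.mod res 10 + PySem.Int.floordiv res 10 else res)
      (pvDr S)
      = pvDr (S + (l.map pvDv).sum) := by
  induction l with
  | nil => intro S _; simp
  | cons c t ih =>
    intro S hS
    have hc := pvDv_bounds' c (hl c (by simp))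
    have hstep := pv_step_dr S (pvDv c) hS hc.1 hc.2
    simp only [List.foldl_cons]
    have : (let res := pvDr S + (PySem.Int.ofStr? (String.ofList [c])).getD 0
            if res > 9 then PySem.Int.mod res 10 + PySem.Int.floordiv res 10 else res)
          = pvDr (S + pvDv c) := hstep
    rw [this, ih (fun x hx => hl x (by simp [hx])) (S + pvDv c) (by omega)]
    simp only [List.map_cons, List.sum_cons]
    ring_nf

lemma pv_foldB (l : List Char) :
    ∀ a : Int, l.foldl (fun acc c => acc + (PySem.Int.ofStr? (String.ofList [c])).getD 0) a
      = a + (l.map pvDv).sum := by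
  induction l with
  | nil => intro a; simp
  | cons c t ih =>
    intro a
    simp only [List.foldl_cons, List.map_cons, List.sum_cons, ih]
    show a + pvDv c + _ = _
    ring

-- ===== VERDICT (by name: the statement is the Claim_ definition above) =====
theorem life_path_number_spec : Claim_equal_life_path_number := by
  intro birthdate _ hpre
  unfold Spec_life_path_number life_path_number life_path_number_alt
  have hchars : ∀ c ∈ (PySem.Str.replace birthdate "-" "").toList, c.toNat < 128 := by
    intro c hc
    rw [pv_replace_toList] at hc
    have hmem := List.mem_of_mem_filter hc
    have := List.all_eq_true.mp hpre c hmem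
    simp only [Bool.or_eq_true, beq_iff_eq, Char.isDigit] at this
    rcases this with h | h
    · subst h; decide
    · simp only [Bool.and_eq_true, decide_eq_true_eq] at h
      have h9 : c.toNat ≤ 57 := h.2
      omega
  have hA := pv_foldA (PySem.Str.replace birthdate "-" "").toList hchars 0 le_rfl
  have hdr0 : pvDr 0 = 0 := by simp [pvDr]
  rw [hdr0] at hA
  simp only []
  rw [hA, pv_foldB _ 0]
  simp only [zero_add, pvDr]
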